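-- pv_equiv track=rewrite | github.com/phueb/Zorro | zorro/grammatical.py | check_agreement_between_pre_nominal_and_noun
-- ===== SOURCE A (Python) =====
-- from typing import Tuple, List
--
-- def check_agreement_between_pre_nominal_and_noun(s: List[str],
--                                                  pre_nominals_singular,
--                                                  pre_nominals_plural,
--                                                  nouns_singular,
--                                                  nouns_plural,
--                                                  ) -> bool:
--     """
--     find two words in sentence which must agree (e.g. "this" and "dog") in single for loop.
--     of the three returned objects, only 2 are defined, while the other are of NoneType.
--     in theory, this prevents need to search through nouns and pre-nominals again, to determine their number.
--     """
--     pre_nominal_s1 = None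
--     pre_nominal_p1 = None
--     noun_s1 = None
--     noun_p1 = None
--     for w_forward, w_backward in zip(s, reversed(s)):
--         if pre_nominal_s1 is None and pre_nominal_p1 is None and w_forward in pre_nominals_singular:
--             pre_nominal_s1 = w_forward
--         elif pre_nominal_s1 is None and pre_nominal_p1 is None and w_forward in pre_nominals_plural:
--             pre_nominal_p1 = w_forward
--         if noun_s1 is None and noun_p1 is None and w_backward in nouns_singular:
--             noun_s1 = w_backward
--         elif noun_s1 is None and noun_p1 is None and w_backward in nouns_plural:
--             noun_p1 = w_backward
--
--     return True if (pre_nominal_s1 and noun_s1) or (pre_nominal_p1 and noun_p1) else False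
-- ===== SOURCE B (Python) =====
-- def check_agreement_between_pre_nominal_and_noun(s,
--                                                  pre_nominals_singular,
--                                                  pre_nominals_plural,
--                                                  nouns_singular,
--                                                  nouns_plural,
--                                                  ):
--     def find(words, singular, plural):
--         # (singular match, plural match) for the first word that is a known form
--         for w in words:
--             if w in singular:
--                 return w, None
--             if w in plural:
--                 return None, w
--         return None, None
--
--     pre_s, pre_p = find(s, pre_nominals_singular, pre_nominals_plural)
--     noun_s, noun_p = find(reversed(s), nouns_singular, nouns_plural)
--     return bool(pre_s and noun_s or pre_p and noun_p)
-- ===== Notes on version B (the rewrite author's own statement) =====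
-- stated objective: simpler
-- what changed: Replaces the fused zip(s, reversed(s)) loop that threads four Option slots through every iteration by two independent early-return scans (first pre-nominal forward, first noun backward), each returning its singular/plural match directly.
import Mathlib
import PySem

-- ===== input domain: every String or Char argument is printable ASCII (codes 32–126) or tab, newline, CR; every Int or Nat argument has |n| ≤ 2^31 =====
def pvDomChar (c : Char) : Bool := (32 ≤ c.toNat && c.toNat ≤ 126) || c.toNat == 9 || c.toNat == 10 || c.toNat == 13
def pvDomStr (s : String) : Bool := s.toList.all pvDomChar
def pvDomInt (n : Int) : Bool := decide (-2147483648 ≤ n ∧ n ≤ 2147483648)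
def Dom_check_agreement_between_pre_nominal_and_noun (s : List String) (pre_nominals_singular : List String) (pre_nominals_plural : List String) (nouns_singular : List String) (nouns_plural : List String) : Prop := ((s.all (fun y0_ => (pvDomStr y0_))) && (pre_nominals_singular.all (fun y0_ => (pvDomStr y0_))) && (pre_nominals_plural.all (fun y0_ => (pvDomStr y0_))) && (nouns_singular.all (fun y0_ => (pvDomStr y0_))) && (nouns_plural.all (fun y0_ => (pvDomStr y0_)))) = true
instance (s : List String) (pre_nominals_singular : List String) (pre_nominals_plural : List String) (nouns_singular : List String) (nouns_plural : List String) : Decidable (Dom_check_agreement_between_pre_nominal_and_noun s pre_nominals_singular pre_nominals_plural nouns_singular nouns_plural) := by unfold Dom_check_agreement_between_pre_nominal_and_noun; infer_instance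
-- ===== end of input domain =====

-- B replaces A's fused zip loop over four Option slots with two independent early-return scans (objective: simpler decomposition).


-- ===== PORT A =====
-- Python truthiness of an Optional[str]: some non-empty string
def pvTruthy (o : Option String) : Bool :=
  match o with
  | some w => w ≠ ""
  | none => false

-- the if/elif pair updating one (singular-slot, plural-slot) half of A's state
def pvStepHalf (sing plur : List String) (st : Option String × Option String) (w : String) :
    Option String × Option String :=
  if st.1 = none ∧ st.2 = none ∧ sing.contains w then (some w, st.2)
  else if st.1 = none ∧ st.2 = none ∧ plur.contains w then (st.1, some w)
  else st

-- one iteration of A's loop body on the state (pre_s1, pre_p1, noun_s1, noun_p1)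
def pvStepA (pre_nominals_singular pre_nominals_plural nouns_singular nouns_plural : List String)
    (st : (Option String × Option String) × (Option String × Option String))
    (wp : String × String) : (Option String × Option String) × (Option String × Option String) :=
  (pvStepHalf pre_nominals_singular pre_nominals_plural st.1 wp.1,
   pvStepHalf nouns_singular nouns_plural st.2 wp.2)

def check_agreement_between_pre_nominal_and_noun (s : List String) (pre_nominals_singular : List String) (pre_nominals_plural : List String) (nouns_singular : List String) (nouns_plural : List String) : Bool :=
  let st := (s.zip s.reverse).foldl
    (pvStepA pre_nominals_singular pre_nominals_plural nouns_singular nouns_plural)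
    ((none, none), (none, none))
  if (pvTruthy st.1.1 && pvTruthy st.2.1) || (pvTruthy st.1.2 && pvTruthy st.2.2) then true else false

-- ===== PORT B =====
-- (singular match, plural match) for the first word of the list that is a known form
def pvFind (sing plur : List String) : List String → Option String × Option String
  | [] => (none, none)
  | w :: ws =>
    if sing.contains w then (some w, none)
    else if plur.contains w then (none, some w)
    else pvFind sing plur ws

def check_agreement_between_pre_nominal_and_noun_alt (s : List String) (pre_nominals_singular : List String) (pre_nominals_plural : List String) (nouns_singular : List String) (nouns_plural : List String) : Bool :=
  let pre := pvFind pre_nominals_singular pre_nominals_plural s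
  let noun := pvFind nouns_singular nouns_plural s.reverse
  (pvTruthy pre.1 && pvTruthy noun.1) || (pvTruthy pre.2 && pvTruthy noun.2)

-- ===== PRECONDITION & SPEC =====
def Spec_check_agreement_between_pre_nominal_and_noun (s : List String) (pre_nominals_singular : List String) (pre_nominals_plural : List String) (nouns_singular : List String) (nouns_plural : List String) (out : Bool) : Prop := out = check_agreement_between_pre_nominal_and_noun_alt s pre_nominals_singular pre_nominals_plural nouns_singular nouns_plural
instance (s : List String) (pre_nominals_singular : List String) (pre_nominals_plural : List String) (nouns_singular : List String) (nouns_plural : List String) (out : Bool) : Decidable (Spec_check_agreement_between_pre_nominal_and_noun s pre_nominals_singular pre_nominals_plural nouns_singular nouns_plural out) := by unfold Spec_check_agreement_between_pre_nominal_and_noun; infer_instance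

-- ===== CLAIM (what is proved, stated in full; the proofs are below) =====
def Claim_equal_check_agreement_between_pre_nominal_and_noun : Prop := ∀ (s : List String) (pre_nominals_singular : List String) (pre_nominals_plural : List String) (nouns_singular : List String) (nouns_plural : List String), Dom_check_agreement_between_pre_nominal_and_noun s pre_nominals_singular pre_nominals_plural nouns_singular nouns_plural → Spec_check_agreement_between_pre_nominal_and_noun s pre_nominals_singular pre_nominals_plural nouns_singular nouns_plural (check_agreement_between_pre_nominal_and_noun s pre_nominals_singular pre_nominals_plural nouns_singular nouns_plural)

-- ===== LEMMAS AND PROOFS =====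
-- a fold with componentwise update over a zip of equal-length lists splits into two folds
theorem pv_foldl_zip_split {σ τ : Type} (f : σ → String → σ) (g : τ → String → τ) :
    ∀ (xs ys : List String) (a : σ) (b : τ), xs.length = ys.length →
    (xs.zip ys).foldl (fun p q => (f p.1 q.1, g p.2 q.2)) (a, b) = (xs.foldl f a, ys.foldl g b) := by
  intro xs
  induction xs with
  | nil => intro ys a b h; cases ys with
    | nil => rfl
    | cons y ys => simp at h
  | cons x xs ih =>
    intro ys a b h
    cases ys with
    | nil => simp at h
    | cons y ys =>
      simp only [List.zip_cons_cons, List.foldl_cons]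
      exact ih ys (f a x) (g b y) (by simpa using h)

-- once a slot is filled, pvStepHalf never changes the state
theorem pv_half_frozen (sing plur : List String) (st : Option String × Option String)
    (h : st.1 ≠ none ∨ st.2 ≠ none) : ∀ l : List String, l.foldl (pvStepHalf sing plur) st = st := by
  intro l
  induction l with
  | nil => rfl
  | cons w ws ih =>
    have hs : pvStepHalf sing plur st w = st := by
      unfold pvStepHalf
      rcases h with h | h <;> · split_ifs with h1 h2 <;> first | rfl | (exfalso; tauto)
    simp [hs, ih]

-- A's half fold computes B's early-return scan
theorem pv_half_eq_find (sing plur : List String) :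
    ∀ l : List String, l.foldl (pvStepHalf sing plur) (none, none) = pvFind sing plur l := by
  intro l
  induction l with
  | nil => rfl
  | cons w ws ih =>
    simp only [List.foldl_cons, pvFind]
    by_cases h1 : w ∈ sing
    · rw [show pvStepHalf sing plur (none, none) w = (some w, none) by
        simp [pvStepHalf, h1]]
      rw [pv_half_frozen sing plur (some w, none) (by simp)]
      simp [h1]
    · by_cases h2 : w ∈ plur
      · rw [show pvStepHalf sing plur (none, none) w = (none, some w) by
          simp [pvStepHalf, h1, h2]]
        rw [pv_half_frozen sing plur (none, some w) (by simp)]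
        simp [h1, h2]
      · rw [show pvStepHalf sing plur (none, none) w = (none, none) by
          simp [pvStepHalf, h1, h2]]
        rw [ih]
        simp [h1, h2]

-- ===== VERDICT (by name: the statement is the Claim_ definition above) =====
theorem check_agreement_between_pre_nominal_and_noun_spec : Claim_equal_check_agreement_between_pre_nominal_and_noun := by
  intro s ps pp ns np _
  unfold Spec_check_agreement_between_pre_nominal_and_noun
  unfold check_agreement_between_pre_nominal_and_noun check_agreement_between_pre_nominal_and_noun_alt
  have hz : (s.zip s.reverse).foldl (pvStepA ps pp ns np) ((none, none), (none, none))
      = (s.foldl (pvStepHalf ps pp) (none, none), s.reverse.foldl (pvStepHalf ns np) (none, none)) :=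
    pv_foldl_zip_split (pvStepHalf ps pp) (pvStepHalf ns np) s s.reverse (none, none) (none, none)
      (by simp)
  rw [hz, pv_half_eq_find, pv_half_eq_find]
  cases h : (pvTruthy (pvFind ps pp s).1 && pvTruthy ((pvFind ns np s.reverse)).1
      || pvTruthy (pvFind ps pp s).2 && pvTruthy ((pvFind ns np s.reverse)).2) <;> simp_all
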